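-- pv_equiv track=rewrite | github.com/CaffeineLiqueur/MusicAgent | backend/app/services/chord.py | apply_inversion
-- ===== SOURCE A (Python) =====
-- from typing import Dict, List, Optional, Sequence, Tuple
--
-- def apply_inversion(notes: Sequence[int], inversion: int) -> List[int]:
--     if not notes:
--         return []
--     ordered = sorted(notes)
--     inv = inversion % len(ordered)
--     for _ in range(inv):
--         top = ordered.pop(0)
--         ordered.append(top + 12)
--     return sorted(ordered)
-- ===== SOURCE B (Python) =====
-- def apply_inversion(notes, inversion):
--     if not notes:
--         return []
--     ordered = sorted(notes)
--     inv = inversion % len(ordered)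
--     raised = [n + 12 for n in ordered[:inv]]
--     tail = ordered[inv:]
--     out = []
--     i = j = 0
--     while i < len(tail) and j < len(raised):
--         if tail[i] <= raised[j]:
--             out.append(tail[i]); i += 1
--         else:
--             out.append(raised[j]); j += 1
--     out.extend(tail[i:])
--     out.extend(raised[j:])
--     return out
-- ===== Notes on version B (the rewrite author's own statement) =====
-- stated objective: faster
-- what changed: B replaces A's pop(0)/append rotation loop and second full sort by slicing out the raised prefix and tail (both already sorted) and merging them with a single two-pointer linear merge.
import Mathlib
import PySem

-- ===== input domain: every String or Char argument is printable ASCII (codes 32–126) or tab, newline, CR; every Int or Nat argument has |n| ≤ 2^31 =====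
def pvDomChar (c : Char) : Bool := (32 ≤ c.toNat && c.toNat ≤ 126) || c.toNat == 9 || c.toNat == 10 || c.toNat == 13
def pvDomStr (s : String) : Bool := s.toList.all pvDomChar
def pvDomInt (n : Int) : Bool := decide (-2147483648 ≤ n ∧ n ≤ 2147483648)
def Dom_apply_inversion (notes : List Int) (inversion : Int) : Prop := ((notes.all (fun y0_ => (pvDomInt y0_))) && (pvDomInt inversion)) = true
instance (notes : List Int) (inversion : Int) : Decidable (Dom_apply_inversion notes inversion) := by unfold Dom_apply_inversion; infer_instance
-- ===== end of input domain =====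

-- B replaces A's second full sort by a linear two-pointer merge of the two already-sorted runs
-- (the raised prefix and the untouched tail); objective: alternative algorithm (merge vs re-sort).


-- ===== PORT A =====
-- one iteration of A's loop body: 'top = ordered.pop(0); ordered.append(top + 12)'
-- (the 'none' branch is Python's IndexError from pop(0) on []; unreachable since inv < len(ordered))
def popAppendStep (o : List Int) : List Int :=
  match PySem.List.pop? o 0 with
  | some (top, rest) => rest ++ [top + 12]
  | none => o

def apply_inversion (notes : List Int) (inversion : Int) : List Int :=
  if notes = [] then []
  else
    let ordered := PySem.List.sorted notes (fun x => x) false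
    let inv := PySem.Int.mod inversion (PySem.List.len ordered)
    let ordered := (PySem.List.pyRange 0 inv 1).foldl (fun o _ => popAppendStep o) ordered
    PySem.List.sorted ordered (fun x => x) false

-- ===== PORT B =====
-- the two-pointer while loop of Source B (advance whichever front is smaller, then the leftovers)
def mergeRuns : List Int → List Int → List Int
  | [], ys => ys
  | x :: xs, [] => x :: xs
  | x :: xs, y :: ys =>
      if x ≤ y then x :: mergeRuns xs (y :: ys) else y :: mergeRuns (x :: xs) ys

def apply_inversion_alt (notes : List Int) (inversion : Int) : List Int :=
  if notes = [] then []
  else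
    let ordered := PySem.List.sorted notes (fun x => x) false
    let inv := PySem.Int.mod inversion (PySem.List.len ordered)
    let raised := (PySem.List.slice ordered none (some inv)).map (fun n => n + 12)
    let tail := PySem.List.slice ordered (some inv) none
    mergeRuns tail raised

-- ===== PRECONDITION & SPEC =====
def Spec_apply_inversion (notes : List Int) (inversion : Int) (out : List Int) : Prop := out = apply_inversion_alt notes inversion
instance (notes : List Int) (inversion : Int) (out : List Int) : Decidable (Spec_apply_inversion notes inversion out) := by unfold Spec_apply_inversion; infer_instance

-- ===== CLAIM (what is proved, stated in full; the proofs are below) =====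
def Claim_equal_apply_inversion : Prop := ∀ (notes : List Int) (inversion : Int), Dom_apply_inversion notes inversion → Spec_apply_inversion notes inversion (apply_inversion notes inversion)

-- ===== LEMMAS AND PROOFS =====

-- mergeRuns is core's List.merge on (· ≤ ·)
theorem mergeRuns_eq_merge (xs ys : List Int) :
    mergeRuns xs ys = List.merge xs ys (fun a b => decide (a ≤ b)) := by
  induction xs generalizing ys with
  | nil => cases ys <;> simp [mergeRuns]
  | cons x xs ih =>
    induction ys with
    | nil => simp [mergeRuns]
    | cons y ys ihy =>
      simp only [mergeRuns, List.merge]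
      by_cases h : x ≤ y <;> simp [h, ih, ihy]

-- A's loop, run k times on o with k ≤ |o|, rotates the first k notes up an octave
theorem foldl_popAppendStep (o : List Int) (k : Nat) (hk : k ≤ o.length) :
    (List.range k).foldl (fun acc _ => popAppendStep acc) o
      = o.drop k ++ (o.take k).map (fun n => n + 12) := by
  induction k with
  | zero => simp
  | succ k ih =>
    have hk' : k ≤ o.length := Nat.le_of_succ_le hk
    have hlt : k < o.length := hk
    rw [List.range_succ, List.foldl_append, ih hk']
    have hdrop : o.drop k = o[k] :: o.drop (k + 1) := List.drop_eq_getElem_cons hlt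
    have htake : o.take (k + 1) = o.take k ++ [o[k]] := by
      rw [List.take_add_one]; simp [List.getElem?_eq_getElem hlt]
    simp only [List.foldl_cons, List.foldl_nil]
    rw [hdrop, List.cons_append]
    simp only [popAppendStep, PySem.List.pop?_zero_cons]
    rw [htake, List.map_append, ← List.append_assoc]
    rfl

theorem apply_inversion_spec : Claim_equal_apply_inversion := by
  intro notes inversion _
  unfold Spec_apply_inversion apply_inversion apply_inversion_alt
  by_cases hn : notes = []
  · simp [hn]
  · simp only [hn, if_false]
    set o := PySem.List.sorted notes (fun x => x) false with ho
    have hlen : 0 < o.length := by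
      have : o ≠ [] := by
        intro h; exact hn ((PySem.List.sorted_eq_nil_iff notes (fun x => x) false).mp h)
      exact List.length_pos_iff.mpr this
    have hlenpos : (0 : Int) < PySem.List.len o := by
      rw [PySem.List.len_eq]; exact_mod_cast hlen
    set inv := PySem.Int.mod inversion (PySem.List.len o) with hinv
    have h0 : 0 ≤ inv := PySem.Int.mod_nonneg _ hlenpos
    have h1 : inv < PySem.List.len o := PySem.Int.mod_lt _ hlenpos
    have hkle : inv.toNat ≤ o.length := by
      rw [PySem.List.len_eq] at h1; omega
    -- both sides as drop/take of o
    have hA : (PySem.List.pyRange 0 inv 1).foldl (fun acc _ => popAppendStep acc) o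
        = o.drop inv.toNat ++ (o.take inv.toNat).map (fun n => n + 12) := by
      have hr : PySem.List.pyRange 0 inv 1
          = (List.range inv.toNat).map (fun k : Nat => (0 : Int) + k) := by
        rw [PySem.List.pyRange_one]; norm_num
      rw [hr, List.foldl_map]
      exact foldl_popAppendStep o inv.toNat hkle
    have hTail : PySem.List.slice o (some inv) none = o.drop inv.toNat :=
      PySem.List.slice_from o h0
    have hRaised : PySem.List.slice o none (some inv) = o.take inv.toNat :=
      PySem.List.slice_to o h0
    rw [hA, hTail, hRaised]
    -- the merge of the two sorted runs is a sorted permutation of the rotated list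
    set tail := o.drop inv.toNat
    set raised := (o.take inv.toNat).map (fun n => n + 12)
    have hso : o.Pairwise (· ≤ ·) := by
      simpa using PySem.List.sorted_pairwise notes (fun x => x)
    have hstail : tail.Pairwise (· ≤ ·) := hso.sublist (List.drop_sublist _ _)
    have hsraised : raised.Pairwise (· ≤ ·) := by
      exact (hso.sublist (List.take_sublist _ _)).map _ (by intro a b h; omega)
    have hperm : (mergeRuns tail raised).Perm (tail ++ raised) := by
      rw [mergeRuns_eq_merge]
      exact List.merge_perm_append _
    have hpair : (mergeRuns tail raised).Pairwise (· ≤ ·) := by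
      rw [mergeRuns_eq_merge]
      exact List.Pairwise.merge hstail hsraised
    exact PySem.List.sorted_id_eq_of_perm_of_pairwise _ _ hperm hpair
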